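-- pv_equiv track=rewrite | github.com/Owen-Reich-Likes-Math/wss_primes_isef | scripts/check_lucas_universe.py | check_lucas_up_to
-- ===== SOURCE A (Python) =====
-- import math
--
-- def is_prime(n):
--     if n < 2:
--         return False
--     if n in (2, 3):
--         return True
--     if n % 2 == 0:
--         return False
--     for i in range(3, int(math.isqrt(n)) + 1, 2):
--         if n % i == 0:
--             return False
--     return True
--
-- def find_primes(n):
--     return [i for i in range(2, n + 1) if is_prime(i)]
--
-- def v_p(n, p):
--     """p-adic valuation of n"""
--     if n == 0:
--         return float("inf")
--     v = 0
--     while n % p == 0: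
--         n //= p
--         v += 1
--     return v
--
-- def legendre(p, D):
--     """
--     Legendre symbol (p / D), where D is an odd prime.
--     """
--     if D < 2 or D % 2 == 0 or not is_prime(D):
--         raise ValueError("D must be an odd prime")
--
--     if p % D == 0:
--         return 0
--
--     euler = pow(p, (D - 1) // 2, D)
--     if euler == D - 1:
--         return -1
--     elif euler == 1:
--         return 1
--     else:
--         return 0
--
-- def lucas_U(n, P, Q):
--     """
--     Computes the Lucas sequence U_n(P, Q) using integer recursion.
--     """
--     if n == 0:
--         return 0
--     if n == 1:
--         return 1
--
--     U0, U1 = 0, 1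
--     for _ in range(2, n + 1):
--         U0, U1 = U1, P * U1 - Q * U0
--     return U1
--
-- def check_lucas_at_point(p, P, Q):
--     """
--     Returns v_p(U_{p - (p/D)}(P, Q))
--     """
--     D = P * P - 4 * Q
--
--     # For this script we require D to be an odd prime
--     if D <= 0 or D % 2 == 0 or not is_prime(D):
--         return None
--
--     chi = legendre(p, D)
--     index = p - chi
--     term = lucas_U(index, P, Q)
--
--     return v_p(term, p)
--
-- def check_lucas_up_to(n, P, Q):
--     xs, ys = [], []
--     for p in find_primes(n):
--         val = check_lucas_at_point(p, P, Q)
--         if val is not None and val != float("inf"):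
--             xs.append(p)
--             ys.append(val)
--     return xs, ys
-- ===== SOURCE B (Python) =====
-- import math
--
--
-- def _is_prime(n):
--     if n < 2:
--         return False
--     if n in (2, 3):
--         return True
--     if n % 2 == 0:
--         return False
--     for i in range(3, int(math.isqrt(n)) + 1, 2):
--         if n % i == 0:
--             return False
--     return True
--
--
-- def _lucas_pair(m, P, Q):
--     """Fast doubling: returns (U_m, U_{m+1}) in O(log m) multiplications."""
--     if m == 0:
--         return (0, 1)
--     a, b = _lucas_pair(m // 2, P, Q)
--     c = a * (2 * b - P * a)          # U_{2k}
--     d = b * b - Q * a * a            # U_{2k+1}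
--     if m % 2:
--         return (d, P * d - Q * c)
--     return (c, d)
--
--
-- def _vp(n, p):
--     """p-adic valuation of n, None for n == 0."""
--     if n == 0:
--         return None
--     v = 0
--     while n % p == 0:
--         n //= p
--         v += 1
--     return v
--
--
-- def check_lucas_up_to(n, P, Q):
--     D = P * P - 4 * Q
--     if D <= 0 or D % 2 == 0 or not _is_prime(D):
--         return [], []
--     half = (D - 1) // 2
--     pairs = []
--     for p in range(2, n + 1):
--         if not _is_prime(p):
--             continue
--         e = pow(p, half, D)
--         chi = -1 if e == D - 1 else (1 if e == 1 else 0)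
--         u = _lucas_pair(p - chi, P, Q)[0]
--         v = _vp(u, p)
--         if v is not None:
--             pairs.append((p, v))
--     return [p for p, v in pairs], [v for p, v in pairs]
-- ===== Notes on version B (the rewrite author's own statement) =====
-- stated objective: faster
-- what changed: Lucas term U_{p-chi} is computed by fast doubling (O(log p) big-int multiplications) instead of the O(p) linear recursion, the primality/oddness test of the discriminant D is hoisted out of the per-prime loop and done once, and the output lists are built as one list of (p,v) pairs split at the end.
import Mathlib
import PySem

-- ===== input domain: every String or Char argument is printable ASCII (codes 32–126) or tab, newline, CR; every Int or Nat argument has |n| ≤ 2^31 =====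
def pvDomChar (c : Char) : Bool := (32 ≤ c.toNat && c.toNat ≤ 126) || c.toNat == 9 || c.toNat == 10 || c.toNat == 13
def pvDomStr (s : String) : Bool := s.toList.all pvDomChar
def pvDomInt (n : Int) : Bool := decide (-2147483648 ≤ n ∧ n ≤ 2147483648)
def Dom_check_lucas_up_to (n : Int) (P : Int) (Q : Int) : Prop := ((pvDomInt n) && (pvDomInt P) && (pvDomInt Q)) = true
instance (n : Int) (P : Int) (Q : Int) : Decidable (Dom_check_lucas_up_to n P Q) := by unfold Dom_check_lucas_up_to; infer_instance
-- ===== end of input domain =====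

-- B replaces the O(p)-step linear Lucas recursion by fast doubling and hoists the
-- discriminant-primality check out of the per-prime loop (objective: faster).

-- ===== PORT A =====
-- int(math.isqrt(n)); exact for 0 ≤ n, and is_prime only reaches it with n ≥ 5
def isqrtI (n : Int) : Int := (Nat.sqrt n.toNat : Int)

-- is_prime, v_p and the Euler-criterion power are textually identical helpers in Source A and
-- Source B; they are defined once here and used by both ports.
-- 'for i in range(3, isqrt(n)+1, 2): if n % i == 0: return False' — the range loop with its
-- early exit, iterated directly (i = 3, 5, ... while i < stop) instead of materializing the list
def oddDivLoop (n stop i : Int) : Bool :=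
  if hlt : i < stop then
    if PySem.Int.mod n i == 0 then true else oddDivLoop n stop (i + 2)
  else false
  termination_by (stop - i).toNat
  decreasing_by omega

def is_prime (n : Int) : Bool :=
  if n < 2 then false
  else if n == 2 || n == 3 then true
  else if PySem.Int.mod n 2 == 0 then false
  else !(oddDivLoop n (isqrtI n + 1) 3)

def find_primes (n : Int) : List Int :=
  (PySem.List.pyRange 2 (n + 1) 1).filter (fun i => is_prime i)

-- while n % p == 0: n //= p; v += 1 — fuel |n| suffices: each pass divides |n| by p ≥ 2
def vpLoop (fuel : Nat) (n p : Int) : Int :=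
  match fuel with
  | 0 => 0
  | f + 1 => if PySem.Int.mod n p == 0 then vpLoop f (PySem.Int.floordiv n p) p + 1 else 0

-- v_p; Python's float("inf") for n == 0 is modelled as none (the caller filters it out)
def v_p (n p : Int) : Option Int :=
  if n = 0 then none else some (vpLoop n.natAbs n p)

-- Python raises ValueError on the first branch; it is unreachable from check_lucas_up_to,
-- which verifies the same condition first, so the port returns 0 there.
def legendre (p D : Int) : Int :=
  if D < 2 || PySem.Int.mod D 2 == 0 || !is_prime D then 0
  else if PySem.Int.mod p D == 0 then 0
  else
    let euler := PySem.Int.powMod p (PySem.Int.floordiv (D - 1) 2).toNat D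
    if euler == D - 1 then -1
    else if euler == 1 then 1
    else 0

def lucas_U (n P Q : Int) : Int :=
  if n = 0 then 0
  else if n = 1 then 1
  else ((PySem.List.pyRange 2 (n + 1) 1).foldl
          (fun (s : Int × Int) _ => (s.2, P * s.2 - Q * s.1)) (0, 1)).2

-- outer none = Python None; the inner Option is v_p's result
def check_lucas_at_point (p P Q : Int) : Option (Option Int) :=
  let D := P * P - 4 * Q
  if decide (D ≤ 0) || PySem.Int.mod D 2 == 0 || !is_prime D then none
  else some (v_p (lucas_U (p - legendre p D) P Q) p)

def check_lucas_up_to (n : Int) (P : Int) (Q : Int) : List Int × List Int :=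
  (find_primes n).foldl
    (fun (acc : List Int × List Int) p =>
      match check_lucas_at_point p P Q with
      | some (some v) => (acc.1 ++ [p], acc.2 ++ [v])
      | _ => acc)
    ([], [])

-- ===== PORT B =====
-- fast doubling on (U_m, U_{m+1}); Source B recurses on a Python int that is ≥ 0 at every
-- call site (m = p - chi ≥ 1), so a Nat argument is exact
def lucas_pair (P Q : Int) (m : Nat) : Int × Int :=
  if h : m = 0 then (0, 1)
  else
    let ab := lucas_pair P Q (m / 2)
    let c := ab.1 * (2 * ab.2 - P * ab.1)
    let d := ab.2 * ab.2 - Q * ab.1 * ab.1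
    if m % 2 = 1 then (d, P * d - Q * c) else (c, d)
  termination_by m
  decreasing_by exact Nat.div_lt_self (Nat.pos_of_ne_zero h) one_lt_two

def check_lucas_up_to_alt (n : Int) (P : Int) (Q : Int) : List Int × List Int :=
  let D := P * P - 4 * Q
  if decide (D ≤ 0) || PySem.Int.mod D 2 == 0 || !is_prime D then ([], [])
  else
    let half := PySem.Int.floordiv (D - 1) 2
    let pairs := (PySem.List.pyRange 2 (n + 1) 1).foldl
      (fun (acc : List (Int × Int)) p =>
        if is_prime p then
          let e := PySem.Int.powMod p half.toNat D
          let chi : Int := if e == D - 1 then -1 else if e == 1 then 1 else 0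
          let u := (lucas_pair P Q (p - chi).toNat).1
          match v_p u p with
          | some v => acc ++ [(p, v)]
          | none => acc
        else acc)
      []
    (pairs.map Prod.fst, pairs.map Prod.snd)

-- ===== PRECONDITION & SPEC =====
def Spec_check_lucas_up_to (n : Int) (P : Int) (Q : Int) (out : List Int × List Int) : Prop := out = check_lucas_up_to_alt n P Q
instance (n : Int) (P : Int) (Q : Int) (out : List Int × List Int) : Decidable (Spec_check_lucas_up_to n P Q out) := by unfold Spec_check_lucas_up_to; infer_instance

-- ===== CLAIM (what is proved, stated in full; the proofs are below) =====
def Claim_equal_check_lucas_up_to : Prop := ∀ (n : Int) (P : Int) (Q : Int), Dom_check_lucas_up_to n P Q → Spec_check_lucas_up_to n P Q (check_lucas_up_to n P Q)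

-- ===== LEMMAS AND PROOFS =====

-- the Lucas sequence U_k(P, Q) as a mathematical reference object
def useq (P Q : Int) : Nat → Int
  | 0 => 0
  | 1 => 1
  | n + 2 => P * useq P Q (n + 1) - Q * useq P Q n

lemma useq_add (P Q : Int) (m n : Nat) :
    useq P Q (m + n + 1) = useq P Q (m + 1) * useq P Q (n + 1) - Q * useq P Q m * useq P Q n := by
  induction n using Nat.twoStepInduction with
  | zero => simp [useq]
  | one =>
    show useq P Q (m + 2) = _
    simp [useq]; ring
  | more n ih1 ih2 =>
    have e1 : m + (n + 2) + 1 = (m + n + 1) + 2 := by omega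
    have e2 : m + (n + 1) + 1 = (m + n + 1) + 1 := by omega
    rw [e1, useq]
    rw [show m + n + 1 + 1 = m + (n + 1) + 1 from by omega, ih2, ih1]
    simp [useq]; ring

lemma useq_two_mul (P Q : Int) (k : Nat) :
    useq P Q (2 * k) = useq P Q k * (2 * useq P Q (k + 1) - P * useq P Q k) := by
  cases k with
  | zero => simp [useq]
  | succ k =>
    have h := useq_add P Q (k + 1) k
    rw [show 2 * (k + 1) = (k + 1) + k + 1 from by omega, h]
    simp [useq]; ring

lemma useq_two_mul_add_one (P Q : Int) (k : Nat) :
    useq P Q (2 * k + 1) = useq P Q (k + 1) * useq P Q (k + 1) - Q * useq P Q k * useq P Q k := by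
  have h := useq_add P Q k k
  rw [show 2 * k + 1 = k + k + 1 from by omega, h]

lemma lucas_pair_eq (P Q : Int) : ∀ m, lucas_pair P Q m = (useq P Q m, useq P Q (m + 1)) := by
  intro m
  induction m using Nat.strong_induction_on with
  | _ m ih =>
    rw [lucas_pair]
    by_cases h0 : m = 0
    · subst h0; simp [useq]
    · simp only [h0, dite_false]
      have ihh := ih (m / 2) (Nat.div_lt_self (Nat.pos_of_ne_zero h0) one_lt_two)
      rw [ihh]
      rcases Nat.even_or_odd m with he | ho
      · have hm2 : m % 2 = 0 := Nat.even_iff.mp he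
        have hm : 2 * (m / 2) = m := by omega
        rw [if_neg (by omega : ¬ m % 2 = 1)]
        refine Prod.ext ?_ ?_
        · show useq P Q (m / 2) * (2 * useq P Q (m / 2 + 1) - P * useq P Q (m / 2)) = useq P Q m
          conv_rhs => rw [← hm]
          rw [useq_two_mul]
        · show useq P Q (m / 2 + 1) * useq P Q (m / 2 + 1) - Q * useq P Q (m / 2) * useq P Q (m / 2) = useq P Q (m + 1)
          rw [show m + 1 = 2 * (m / 2) + 1 from by omega, useq_two_mul_add_one]
      · have hm2 : m % 2 = 1 := Nat.odd_iff.mp ho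
        have hm : 2 * (m / 2) + 1 = m := by omega
        rw [if_pos hm2]
        refine Prod.ext ?_ ?_
        · show useq P Q (m / 2 + 1) * useq P Q (m / 2 + 1) - Q * useq P Q (m / 2) * useq P Q (m / 2) = useq P Q m
          conv_rhs => rw [← hm]
          rw [useq_two_mul_add_one]
        · show P * (useq P Q (m / 2 + 1) * useq P Q (m / 2 + 1) - Q * useq P Q (m / 2) * useq P Q (m / 2)) -
              Q * (useq P Q (m / 2) * (2 * useq P Q (m / 2 + 1) - P * useq P Q (m / 2))) = useq P Q (m + 1)
          rw [← useq_two_mul_add_one, ← useq_two_mul, show m + 1 = 2 * (m / 2) + 2 from by omega, useq]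

lemma foldl_lucas_step (P Q : Int) (l : List Int) : ∀ (k : Nat),
    l.foldl (fun (s : Int × Int) _ => (s.2, P * s.2 - Q * s.1)) (useq P Q k, useq P Q (k + 1))
      = (useq P Q (k + l.length), useq P Q (k + l.length + 1)) := by
  induction l with
  | nil => intro k; simp
  | cons x t ih =>
    intro k
    rw [List.foldl_cons]
    have hst : ((useq P Q k, useq P Q (k + 1)).2,
        P * (useq P Q k, useq P Q (k + 1)).2 - Q * (useq P Q k, useq P Q (k + 1)).1)
        = (useq P Q (k + 1), useq P Q (k + 1 + 1)) := by
      refine Prod.ext rfl ?_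
      show P * useq P Q (k + 1) - Q * useq P Q k = useq P Q (k + 2)
      simp [useq]
    rw [hst, ih (k + 1)]
    refine Prod.ext ?_ ?_ <;> · simp only []; congr 1; simp [List.length_cons]; omega

lemma lucas_U_eq (P Q n : Int) (h : 1 ≤ n) : lucas_U n P Q = useq P Q n.toNat := by
  unfold lucas_U
  rw [if_neg (by omega : ¬ n = 0)]
  by_cases h1 : n = 1
  · subst h1; simp [useq]
  · rw [if_neg h1]
    have h2 : 2 ≤ n := by omega
    have hinit : ((0 : Int), (1 : Int)) = (useq P Q 0, useq P Q (0 + 1)) := rfl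
    rw [hinit, foldl_lucas_step P Q _ 0]
    have hlen : (PySem.List.pyRange 2 (n + 1) 1).length = (n - 1).toNat := by
      rw [PySem.List.length_pyRange_one]; congr 1; omega
    show useq P Q (0 + (PySem.List.pyRange 2 (n + 1) 1).length + 1) = useq P Q n.toNat
    rw [hlen]; congr 1; omega

-- B's inline Euler-criterion Legendre symbol
def chiB (p D : Int) : Int :=
  if PySem.Int.powMod p (PySem.Int.floordiv (D - 1) 2).toNat D == D - 1 then -1
  else if PySem.Int.powMod p (PySem.Int.floordiv (D - 1) 2).toNat D == 1 then 1 else 0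

-- A's per-prime value and B's per-prime value
def hA (P Q p : Int) : Option Int :=
  v_p (lucas_U (p - legendre p (P * P - 4 * Q)) P Q) p

def hB (P Q p : Int) : Option Int :=
  v_p ((lucas_pair P Q (p - chiB p (P * P - 4 * Q)).toNat).1) p

lemma is_prime_two_le (n : Int) (h : is_prime n = true) : 2 ≤ n := by
  by_contra hlt
  unfold is_prime at h
  rw [if_pos (by omega : n < 2)] at h
  exact Bool.false_ne_true h

lemma legendre_eq_chiB (p D : Int) (hD0 : ¬ D ≤ 0) (hDo : PySem.Int.mod D 2 ≠ 0)
    (hDp : is_prime D = true) : legendre p D = chiB p D := by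
  have hD2 : 2 ≤ D := is_prime_two_le D hDp
  have hD3 : 3 ≤ D := by
    rcases lt_or_ge D 3 with h | h
    · have : D = 2 := by omega
      subst this
      exact absurd (by decide : PySem.Int.mod 2 2 = 0) hDo
    · exact h
  have hDo2 : ¬ (2 ∣ D) := by rw [← PySem.Int.mod_eq_zero_iff_dvd]; exact hDo
  unfold legendre chiB
  rw [if_neg (by simp [hDp, hDo2]; omega)]
  by_cases hpd : PySem.Int.mod p D = 0
  · rw [if_pos (by simpa using hpd)]
    have hdvd : D ∣ p := (PySem.Int.mod_eq_zero_iff_dvd p D).mp hpd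
    have ht1 : 1 ≤ PySem.Int.floordiv (D - 1) 2 := by
      rw [PySem.Int.le_floordiv_iff_mul_le (by omega : (0:Int) < 2)]; omega
    have htn : (PySem.Int.floordiv (D - 1) 2).toNat ≠ 0 := by omega
    have hpow : PySem.Int.powMod p (PySem.Int.floordiv (D - 1) 2).toNat D = 0 := by
      rw [PySem.Int.powMod_eq, PySem.Int.mod_eq_zero_iff_dvd]
      exact dvd_pow hdvd htn
    rw [hpow]
    rw [if_neg (by simp; omega), if_neg (by simp)]
  · rw [if_neg (by simpa using hpd)]

lemma chiB_bounds (p D : Int) : -1 ≤ chiB p D ∧ chiB p D ≤ 1 := by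
  unfold chiB; split_ifs <;> omega

lemma h_eq (P Q p : Int) (hp : 2 ≤ p)
    (hD0 : ¬ P * P - 4 * Q ≤ 0) (hDo : PySem.Int.mod (P * P - 4 * Q) 2 ≠ 0)
    (hDp : is_prime (P * P - 4 * Q) = true) : hA P Q p = hB P Q p := by
  unfold hA hB
  rw [legendre_eq_chiB p _ hD0 hDo hDp]
  have hb := chiB_bounds p (P * P - 4 * Q)
  have hidx : 1 ≤ p - chiB p (P * P - 4 * Q) := by omega
  rw [lucas_U_eq P Q _ hidx, lucas_pair_eq]

-- the two output accumulators of A are the projections of B's pair accumulator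
lemma fold_pairs (h : Int → Option Int) (L : List Int) : ∀ (q : List (Int × Int)),
    L.foldl (fun (acc : List Int × List Int) p =>
        match h p with
        | some v => (acc.1 ++ [p], acc.2 ++ [v])
        | none => acc) (q.map Prod.fst, q.map Prod.snd)
    = ((L.foldl (fun (acc : List (Int × Int)) p =>
          match h p with
          | some v => acc ++ [(p, v)]
          | none => acc) q).map Prod.fst,
       (L.foldl (fun (acc : List (Int × Int)) p =>
          match h p with
          | some v => acc ++ [(p, v)]
          | none => acc) q).map Prod.snd) := by
  induction L with
  | nil => intro q; simp
  | cons x t ih =>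
    intro q
    simp only [List.foldl_cons]
    cases hx : h x with
    | none => exact ih q
    | some v => simpa using ih (q ++ [(x, v)])

lemma foldl_keep {alpha beta : Type} (L : List alpha) (init : beta) :
    L.foldl (fun acc _ => acc) init = init := by
  induction L generalizing init with
  | nil => rfl
  | cons x t ih => exact ih init

-- ===== VERDICT (by name: the statement is the Claim_ definition above) =====
theorem check_lucas_up_to_spec : Claim_equal_check_lucas_up_to := by
  intro n P Q _
  simp only [Spec_check_lucas_up_to, check_lucas_up_to, check_lucas_up_to_alt, find_primes]
  by_cases hg : (decide (P * P - 4 * Q ≤ 0) || PySem.Int.mod (P * P - 4 * Q) 2 == 0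
      || !is_prime (P * P - 4 * Q)) = true
  · -- invalid discriminant: every check_lucas_at_point is None, B returns ([], []) at once
    rw [if_pos hg]
    rw [PySem.List.foldl_congr_mem _ _ (fun acc _ => acc) _
        (by intro acc x _
            simp only [check_lucas_at_point]
            rw [if_pos hg])]
    exact foldl_keep _ _
  · have hg' : (decide (P * P - 4 * Q ≤ 0) || PySem.Int.mod (P * P - 4 * Q) 2 == 0
        || !is_prime (P * P - 4 * Q)) = false := Bool.eq_false_iff.mpr hg
    have hfacts : ¬ (P * P - 4 * Q ≤ 0) ∧ PySem.Int.mod (P * P - 4 * Q) 2 ≠ 0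
        ∧ is_prime (P * P - 4 * Q) = true := by
      simp only [Bool.or_eq_false_iff, decide_eq_false_iff_not, beq_eq_false_iff_ne,
        Bool.not_eq_false'] at hg'
      exact ⟨hg'.1.1, hg'.1.2, hg'.2⟩
    obtain ⟨hD0, hDo, hDp⟩ := hfacts
    rw [if_neg hg, List.foldl_filter]
    -- A's step, written through hA
    rw [PySem.List.foldl_congr_mem _ _
        (fun (acc : List Int × List Int) p =>
          match (if is_prime p then hA P Q p else none) with
          | some v => (acc.1 ++ [p], acc.2 ++ [v])
          | none => acc) _
        (by intro acc p _
            by_cases hp : is_prime p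
            · simp only [hp, if_true, check_lucas_at_point]
              rw [if_neg hg]
              cases hv : hA P Q p with
              | none => simp [hA] at hv; simp [hv]
              | some v => simp [hA] at hv; simp [hv]
            · simp [hp])]
    -- replace hA by hB (members of the range are ≥ 2)
    rw [PySem.List.foldl_congr_mem _ _
        (fun (acc : List Int × List Int) p =>
          match (if is_prime p then hB P Q p else none) with
          | some v => (acc.1 ++ [p], acc.2 ++ [v])
          | none => acc) _
        (by intro acc p hmem
            have hp2 : 2 ≤ p := ((PySem.List.mem_pyRange_one).mp hmem).1
            rw [h_eq P Q p hp2 hD0 hDo hDp])]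
    -- A-shaped fold of pairs = projections of B's pair fold
    have hfp := fold_pairs (fun p => if is_prime p then hB P Q p else none)
      (PySem.List.pyRange 2 (n + 1) 1) []
    simp only [List.map_nil] at hfp
    rw [hfp]
    -- B's step, written through hB
    refine congrArg₂ Prod.mk ?_ ?_ <;>
    · refine congrArg _ ?_
      apply PySem.List.foldl_congr_mem
      intro acc p _
      by_cases hp : is_prime p
      · simp only [hp, if_true]
        cases hv : hB P Q p with
        | none => simp only [hB, chiB] at hv; rw [hv]
        | some v => simp only [hB, chiB] at hv; rw [hv]
      · simp [hp]
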